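-- pv_equiv track=rewrite | github.com/iggy157/bdi_aiwolf_inlg2025 | src/utils/bdi/micro_bdi/talk_from_intention.py | trim_ignoring_spaces
-- ===== SOURCE A (Python) =====
-- def trim_ignoring_spaces(s: str, limit: int) -> str:
--     """Trim string to limit non-space characters while preserving spaces."""
--     out_chars = []
--     count = 0
--     for ch in s:
--         non_space = (ch != ' ')
--         if non_space:
--             if count >= limit:
--                 break
--             count += 1
--         out_chars.append(ch)
--     return ''.join(out_chars)
-- ===== SOURCE B (Python) =====
-- def trim_ignoring_spaces(s: str, limit: int) -> str:
--     """Trim string to limit non-space characters while preserving spaces."""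
--     positions = [i for i, ch in enumerate(s) if ch != ' ']
--     k = max(limit, 0)
--     if len(positions) <= k:
--         return s
--     return s[:positions[k]]
-- ===== Notes on version B (the rewrite author's own statement) =====
-- stated objective: alternative
-- what changed: Replaces the stateful per-char append/count/break loop with building the index table of non-space positions once and returning either s unchanged or a single slice s[:positions[max(limit,0)]].
import Mathlib
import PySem

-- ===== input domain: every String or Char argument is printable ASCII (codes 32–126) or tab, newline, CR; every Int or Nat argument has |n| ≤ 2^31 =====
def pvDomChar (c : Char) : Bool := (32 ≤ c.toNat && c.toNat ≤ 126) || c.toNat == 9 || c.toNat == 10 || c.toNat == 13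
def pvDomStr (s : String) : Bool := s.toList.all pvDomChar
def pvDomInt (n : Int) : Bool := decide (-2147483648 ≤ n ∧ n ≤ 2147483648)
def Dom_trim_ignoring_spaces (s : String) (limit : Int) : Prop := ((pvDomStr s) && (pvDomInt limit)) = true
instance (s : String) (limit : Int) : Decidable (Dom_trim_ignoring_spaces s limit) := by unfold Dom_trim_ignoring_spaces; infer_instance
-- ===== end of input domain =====

-- B replaces A's stateful per-char count/break loop with an index table of the
-- non-space positions plus a single slice (alternative decomposition, same cost).

-- ===== PORT A =====
-- the for-loop with `count`, `break` and `out_chars.append(ch)`: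
-- on `break` the accumulated prefix is returned
def pvGoA (cs : List Char) (limit : Int) (count : Int) : List Char :=
  match cs with
  | [] => []
  | c :: rest =>
    if c ≠ ' ' then
      if count ≥ limit then []
      else c :: pvGoA rest limit (count + 1)
    else c :: pvGoA rest limit count

def trim_ignoring_spaces (s : String) (limit : Int) : String :=
  String.ofList (pvGoA s.toList limit 0)

-- ===== PORT B =====
def trim_ignoring_spaces_alt (s : String) (limit : Int) : String :=
  let positions := ((PySem.List.enumerate s.toList 0).filter (fun p => p.2 ≠ ' ')).map Prod.fst
  let k := max limit 0
  if (positions.length : Int) ≤ k then s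
  else PySem.Str.slice s none (some ((positions[k.toNat]?).getD 0))

-- ===== PRECONDITION & SPEC =====
def Spec_trim_ignoring_spaces (s : String) (limit : Int) (out : String) : Prop := out = trim_ignoring_spaces_alt s limit
instance (s : String) (limit : Int) (out : String) : Decidable (Spec_trim_ignoring_spaces s limit out) := by unfold Spec_trim_ignoring_spaces; infer_instance

-- ===== CLAIM (what is proved, stated in full; the proofs are below) =====
def Claim_equal_trim_ignoring_spaces : Prop := ∀ (s : String) (limit : Int), Dom_trim_ignoring_spaces s limit → Spec_trim_ignoring_spaces s limit (trim_ignoring_spaces s limit)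

-- ===== LEMMAS AND PROOFS =====

-- A's loop depends on limit and count only through the remaining budget limit - count
def pvGoN (cs : List Char) (b : Int) : List Char :=
  match cs with
  | [] => []
  | c :: rest =>
    if c ≠ ' ' then
      if b ≤ 0 then []
      else c :: pvGoN rest (b - 1)
    else c :: pvGoN rest b

theorem pvGoA_eq_goN (cs : List Char) : ∀ (limit count : Int),
    pvGoA cs limit count = pvGoN cs (limit - count) := by
  induction cs with
  | nil => intro limit count; rfl
  | cons c rest ih =>
    intro limit count
    simp only [pvGoA, pvGoN]
    by_cases hc : c = ' '
    · simp [hc, ih]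
    · have h1 : (count ≥ limit) ↔ (limit - count ≤ 0) := by omega
      simp only [hc, if_neg, ne_eq, not_false_iff, if_pos]
      rw [show (limit - count - 1) = limit - (count + 1) by ring] at *
      by_cases hb : count ≥ limit
      · simp [hb, h1.mp hb]
      · have : ¬ (limit - count ≤ 0) := by omega
        simp [hb, this, ih]

-- recursive characterisation of the non-space index table
def pvIdxs : List Char → List Int
  | [] => []
  | c :: cs => if c = ' ' then (pvIdxs cs).map (· + 1) else 0 :: (pvIdxs cs).map (· + 1)

theorem pvIdxs_nonneg (cs : List Char) : ∀ x ∈ pvIdxs cs, 0 ≤ x := by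
  induction cs with
  | nil => simp [pvIdxs]
  | cons c rest ih =>
    intro x hx
    simp only [pvIdxs] at hx
    by_cases hc : c = ' ' <;> simp [hc] at hx
    · obtain ⟨y, hy, rfl⟩ := hx
      have := ih y hy; omega
    · rcases hx with rfl | ⟨y, hy, rfl⟩
      · omega
      · have := ih y hy; omega

theorem pvPositions_eq (cs : List Char) : ∀ (n : Int),
    (((PySem.List.enumerate cs n).filter (fun p => p.2 ≠ ' ')).map Prod.fst)
      = (pvIdxs cs).map (· + n) := by
  induction cs with
  | nil => intro n; simp [PySem.List.enumerate_nil, pvIdxs]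
  | cons c rest ih =>
    intro n
    rw [PySem.List.enumerate_cons]
    simp only [pvIdxs]
    simp only [ne_eq, decide_not] at ih ⊢
    by_cases hc : c = ' '
    · simp only [hc, List.filter_cons]
      have h2 : ((fun x : Int => x + n) ∘ (fun x : Int => x + 1)) = (fun x : Int => x + (n + 1)) := by
        funext x; simp; ring
      simp [ih, List.map_map, h2]
    · simp only [List.filter_cons]
      have h2 : ((fun x : Int => x + n) ∘ (fun x : Int => x + 1)) = (fun x : Int => x + (n + 1)) := by
        funext x; simp; ring
      simp [hc, ih, List.map_map, h2]

-- the budget loop equals the table-and-slice computation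
theorem pvGoN_eq (cs : List Char) : ∀ (b : Int),
    pvGoN cs b = (if ((pvIdxs cs).length : Int) ≤ max b 0 then cs
      else cs.take (((pvIdxs cs)[(max b 0).toNat]?).getD 0).toNat) := by
  induction cs with
  | nil => intro b; simp [pvGoN, pvIdxs]
  | cons c rest ih =>
    intro b
    by_cases hc : c = ' '
    · have hrec : pvGoN (c :: rest) b = c :: pvGoN rest b := by simp [pvGoN, hc]
      have hL : pvIdxs (c :: rest) = (pvIdxs rest).map (· + 1) := by simp [pvIdxs, hc]
      rw [hrec, ih b, hL]
      by_cases hlen : ((pvIdxs rest).length : Int) ≤ max b 0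
      · rw [if_pos hlen, if_pos (by simpa using hlen)]
      · have hk : (max b 0).toNat < (pvIdxs rest).length := by omega
        have hget : (pvIdxs rest)[(max b 0).toNat]? = some ((pvIdxs rest)[(max b 0).toNat]) :=
          List.getElem?_eq_getElem hk
        have hnn : 0 ≤ (pvIdxs rest)[(max b 0).toNat] :=
          pvIdxs_nonneg rest _ (List.getElem_mem hk)
        rw [if_neg hlen, if_neg (by simpa using hlen), List.getElem?_map, hget]
        simp only [Option.map_some, Option.getD_some]
        rw [show ((pvIdxs rest)[(max b 0).toNat] + 1).toNat
              = ((pvIdxs rest)[(max b 0).toNat]).toNat + 1 by omega,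
           List.take_succ_cons]
    · have hL : pvIdxs (c :: rest) = 0 :: (pvIdxs rest).map (· + 1) := by simp [pvIdxs, hc]
      by_cases hb : b ≤ 0
      · have hrec : pvGoN (c :: rest) b = [] := by simp [pvGoN, hc, hb]
        have hmax : max b 0 = (0 : Int) := by omega
        rw [hrec, hL, hmax]
        have hcond : ¬ (((0 :: (pvIdxs rest).map (· + 1)).length : Int) ≤ (0 : Int)) := by
          simp only [List.length_cons]
          push_cast
          omega
        rw [if_neg hcond]
        simp
      · have hrec : pvGoN (c :: rest) b = c :: pvGoN rest (b - 1) := by simp [pvGoN, hc, hb]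
        have hmax : max b 0 = b := by omega
        have hmax' : max (b - 1) 0 = b - 1 := by omega
        rw [hrec, ih (b - 1), hL, hmax, hmax']
        by_cases hlen : ((pvIdxs rest).length : Int) ≤ b - 1
        · rw [if_pos hlen, if_pos (by simp only [List.length_cons, List.length_map]; push_cast; omega)]
        · have hk : (b - 1).toNat < (pvIdxs rest).length := by omega
          have hget : (pvIdxs rest)[(b - 1).toNat]? = some ((pvIdxs rest)[(b - 1).toNat]) :=
            List.getElem?_eq_getElem hk
          have hnn : 0 ≤ (pvIdxs rest)[(b - 1).toNat] :=
            pvIdxs_nonneg rest _ (List.getElem_mem hk)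
          rw [if_neg hlen,
             if_neg (by simp only [List.length_cons, List.length_map]; push_cast; omega)]
          rw [show b.toNat = (b - 1).toNat + 1 by omega,
             List.getElem?_cons_succ, List.getElem?_map, hget]
          simp only [Option.map_some, Option.getD_some]
          rw [show ((pvIdxs rest)[(b - 1).toNat] + 1).toNat
                = ((pvIdxs rest)[(b - 1).toNat]).toNat + 1 by omega,
             List.take_succ_cons]

-- ===== VERDICT (by name: the statement is the Claim_ definition above) =====
theorem trim_ignoring_spaces_spec : Claim_equal_trim_ignoring_spaces := by
  intro s limit _
  unfold Spec_trim_ignoring_spaces trim_ignoring_spaces trim_ignoring_spaces_alt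
  rw [pvGoA_eq_goN, sub_zero, pvGoN_eq]
  rw [pvPositions_eq s.toList 0]
  have hmap0 : (pvIdxs s.toList).map (· + (0 : Int)) = pvIdxs s.toList := by
    simp
  rw [hmap0]
  by_cases hlen : ((pvIdxs s.toList).length : Int) ≤ max limit 0
  · simp [hlen]
  · have hk : (max limit 0).toNat < (pvIdxs s.toList).length := by omega
    have hget : (pvIdxs s.toList)[(max limit 0).toNat]? = some ((pvIdxs s.toList)[(max limit 0).toNat]) :=
      List.getElem?_eq_getElem hk
    have hnn : 0 ≤ (pvIdxs s.toList)[(max limit 0).toNat] :=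
      pvIdxs_nonneg s.toList _ (List.getElem_mem hk)
    simp only [if_neg hlen, hget, Option.getD_some]
    apply String.toList_inj.mp
    simp only [String.toList_ofList]
    rw [show (PySem.Str.slice s none (some ((pvIdxs s.toList)[(max limit 0).toNat]))).toList
        = PySem.List.slice s.toList none (some ((pvIdxs s.toList)[(max limit 0).toNat])) from by
      simp [PySem.Str.toList_slice]]
    rw [PySem.List.slice_to _ hnn]
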